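-- pv_equiv track=rewrite | github.com/anuraggiri-do-it/python-learning-lab | data_structure/pattern/sliding_window/LC3661.py | maxWallsDestroyed
-- ===== SOURCE A (Python) =====
-- from bisect import bisect_left, bisect_right
-- from typing import List
--
-- def maxWallsDestroyed(robots: List[int], distance: List[int], walls: List[int]) -> int:
--     sorted_robots = sorted(robots)
--     sorted_walls = sorted(walls)
--     destroyed = set()
--
--     for pos, dist in zip(robots, distance):
--         idx = bisect_left(sorted_robots, pos)  # index of this robot in sorted list
--
--         # Left range: blocked by nearest robot to the left
--         left_bound = sorted_robots[idx - 1] + 1 if idx > 0 else 0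
--         left_start = max(left_bound, pos - dist)
--
--         # Right range: blocked by nearest robot to the right
--         right_bound = sorted_robots[idx + 1] - 1 if idx < len(sorted_robots) - 1 else float('inf')
--         right_end = min(right_bound, pos + dist)
--
--         # Walls in [left_start, pos]
--         l = bisect_left(sorted_walls, left_start)
--         r = bisect_right(sorted_walls, pos)
--         for i in range(l, r):
--             destroyed.add(sorted_walls[i])
--
--         # Walls in [pos, right_end]
--         l = bisect_left(sorted_walls, pos)
--         r = bisect_right(sorted_walls, right_end)
--         for i in range(l, r):
--             destroyed.add(sorted_walls[i])
--
--     return len(destroyed)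
-- ===== SOURCE B (Python) =====
-- from bisect import bisect_left
-- from typing import List
--
--
-- def maxWallsDestroyed(robots: List[int], distance: List[int], walls: List[int]) -> int:
--     # Collect each robot's two inclusive destruction spans, sort them by left end,
--     # then sweep the distinct wall positions in increasing order keeping the maximal
--     # right end of the spans already opened: a wall is destroyed iff that maximum
--     # reaches it.  No bisecting into the wall list, no set of destroyed walls.
--     sorted_robots = sorted(robots)
--     n = len(sorted_robots)
--     spans = []
--     for pos, dist in zip(robots, distance):
--         idx = bisect_left(sorted_robots, pos)
--         left_bound = sorted_robots[idx - 1] + 1 if idx > 0 else 0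
--         left_start = max(left_bound, pos - dist)
--         right_end = min(sorted_robots[idx + 1] - 1, pos + dist) if idx < n - 1 else pos + dist
--         spans += [(left_start, pos), (pos, right_end)]
--     spans.sort(key=lambda s: s[0])
--     count = 0
--     j = 0
--     best = None  # maximal right end among spans whose left end <= current wall
--     for w in sorted(set(walls)):
--         while j < len(spans) and spans[j][0] <= w:
--             if best is None or spans[j][1] > best:
--                 best = spans[j][1]
--             j += 1
--         if best is not None and best >= w:
--             count += 1
--     return count
-- ===== Notes on version B (the rewrite author's own statement) =====
-- stated objective: alternative
-- what changed: B never bisects into the sorted wall list nor accumulates destroyed walls into a set: it collects each robot's two inclusive destruction spans, sorts them by left end, and sweeps the distinct wall positions once with a running maximal right end, counting a wall iff that maximum reaches it.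
import Mathlib
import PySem

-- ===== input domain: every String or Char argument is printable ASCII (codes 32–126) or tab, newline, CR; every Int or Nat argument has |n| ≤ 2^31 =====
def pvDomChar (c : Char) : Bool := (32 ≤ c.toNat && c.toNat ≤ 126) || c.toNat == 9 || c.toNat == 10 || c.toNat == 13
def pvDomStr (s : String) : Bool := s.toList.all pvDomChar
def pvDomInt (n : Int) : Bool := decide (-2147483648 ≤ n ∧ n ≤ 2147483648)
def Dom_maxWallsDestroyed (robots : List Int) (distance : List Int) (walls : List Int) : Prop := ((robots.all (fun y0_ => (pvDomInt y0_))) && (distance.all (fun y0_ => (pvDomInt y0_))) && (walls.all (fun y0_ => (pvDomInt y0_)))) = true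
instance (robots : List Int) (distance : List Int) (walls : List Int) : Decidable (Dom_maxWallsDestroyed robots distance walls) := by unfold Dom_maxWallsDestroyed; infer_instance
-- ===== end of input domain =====

-- B collects each robot's two inclusive destruction spans, sorts them by left end and
-- sweeps the distinct wall positions once with a running maximal right end, instead of
-- A's bisecting into the sorted wall list and accumulating every range's walls into a set.

-- ===== PORT A =====
-- inner loop 'for i in range(l, r): destroyed.add(sorted_walls[i])'; the indices produced by
-- bisect are provably < len(sorted_walls), so getD's default is never read
def addRangeA (sorted_walls : List Int) (destroyed : PySem.Set Int) (l r : Nat) : PySem.Set Int :=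
  (List.range' l (r - l)).foldl (fun d i => PySem.Set.add d (sorted_walls.getD i 0)) destroyed

-- one iteration of A's 'for pos, dist in zip(robots, distance)' loop
def stepA (sorted_robots sorted_walls : List Int) (destroyed : PySem.Set Int) (pd : Int × Int) : PySem.Set Int :=
  let pos := pd.1
  let dist := pd.2
  let idx := PySem.List.bisectLeft sorted_robots pos
  let left_bound := if 0 < idx then sorted_robots.getD (idx - 1) 0 + 1 else 0
  let left_start := max left_bound (pos - dist)
  -- float('inf') (taken for the rightmost robot) is modelled as 'none': it is only ever
  -- consumed by min(·, pos + dist), where none ↦ pos + dist, exactly as min(inf, x) = x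
  let right_bound : Option Int := if idx < sorted_robots.length - 1 then some (sorted_robots.getD (idx + 1) 0 - 1) else none
  let right_end := match right_bound with
    | some rb => min rb (pos + dist)
    | none => pos + dist
  let d1 := addRangeA sorted_walls destroyed (PySem.List.bisectLeft sorted_walls left_start) (PySem.List.bisectRight sorted_walls pos)
  addRangeA sorted_walls d1 (PySem.List.bisectLeft sorted_walls pos) (PySem.List.bisectRight sorted_walls right_end)

def maxWallsDestroyed (robots : List Int) (distance : List Int) (walls : List Int) : Int :=
  let sorted_robots := PySem.List.sorted robots (fun x => x) false
  let sorted_walls := PySem.List.sorted walls (fun x => x) false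
  let destroyed := (robots.zip distance).foldl (stepA sorted_robots sorted_walls) PySem.Set.empty
  ((destroyed.length : Nat) : Int)

-- ===== PORT B =====
-- one iteration of B's loop: append the robot's two inclusive spans
def stepB (sorted_robots : List Int) (spans : List (Int × Int)) (pd : Int × Int) : List (Int × Int) :=
  let pos := pd.1
  let dist := pd.2
  let idx := PySem.List.bisectLeft sorted_robots pos
  let left_bound := if 0 < idx then sorted_robots.getD (idx - 1) 0 + 1 else 0
  let left_start := max left_bound (pos - dist)
  let right_end := if idx < sorted_robots.length - 1 then min (sorted_robots.getD (idx + 1) 0 - 1) (pos + dist) else pos + dist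
  spans ++ [(left_start, pos), (pos, right_end)]

-- B's inner 'while j < len(spans) and spans[j][0] <= w: ...' loop: consume the spans
-- whose left end is <= w, updating best; returns the remaining spans and the new best
def sweepConsume (w : Int) : List (Int × Int) → Option Int → List (Int × Int) × Option Int
  | [], best => ([], best)
  | sp :: rest, best =>
    if sp.1 ≤ w then
      sweepConsume w rest
        (match best with
          | none => some sp.2
          | some b => if sp.2 > b then some sp.2 else some b)
    else (sp :: rest, best)

-- B's 'for w in sorted(set(walls))' loop
def sweepB : List Int → List (Int × Int) → Option Int → Int → Int
  | [], _, _, count => count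
  | w :: dws, spansRest, best, count =>
    let rb := sweepConsume w spansRest best
    sweepB dws rb.1 rb.2
      (if (match rb.2 with | some b => decide (b ≥ w) | none => false) then count + 1 else count)

def maxWallsDestroyed_alt (robots : List Int) (distance : List Int) (walls : List Int) : Int :=
  let sorted_robots := PySem.List.sorted robots (fun x => x) false
  let spans := (robots.zip distance).foldl (stepB sorted_robots) []
  let spans_sorted := PySem.List.sorted spans (fun s => s.1) false   -- spans.sort(key=lambda s: s[0])
  sweepB (PySem.List.sorted (PySem.Set.ofList walls) (fun x => x) false) spans_sorted none 0

-- ===== PRECONDITION & SPEC =====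
def Spec_maxWallsDestroyed (robots : List Int) (distance : List Int) (walls : List Int) (out : Int) : Prop := out = maxWallsDestroyed_alt robots distance walls
instance (robots : List Int) (distance : List Int) (walls : List Int) (out : Int) : Decidable (Spec_maxWallsDestroyed robots distance walls out) := by unfold Spec_maxWallsDestroyed; infer_instance

-- ===== CLAIM (what is proved, stated in full; the proofs are below) =====
def Claim_equal_maxWallsDestroyed : Prop := ∀ (robots : List Int) (distance : List Int) (walls : List Int), Dom_maxWallsDestroyed robots distance walls → Spec_maxWallsDestroyed robots distance walls (maxWallsDestroyed robots distance walls)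

-- ===== LEMMAS AND PROOFS =====

-- the left/right endpoint of the two spans a robot (pos, dist) contributes
def pvSpanL (sr : List Int) (pd : Int × Int) : Int :=
  max (if 0 < PySem.List.bisectLeft sr pd.1 then sr.getD (PySem.List.bisectLeft sr pd.1 - 1) 0 + 1 else 0) (pd.1 - pd.2)

def pvSpanR (sr : List Int) (pd : Int × Int) : Int :=
  if PySem.List.bisectLeft sr pd.1 < sr.length - 1
    then min (sr.getD (PySem.List.bisectLeft sr pd.1 + 1) 0 - 1) (pd.1 + pd.2)
    else pd.1 + pd.2

-- 'robot pd destroys wall w'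
def pvCov (sr : List Int) (pd : Int × Int) (w : Int) : Prop :=
  (pvSpanL sr pd ≤ w ∧ w ≤ pd.1) ∨ (pd.1 ≤ w ∧ w ≤ pvSpanR sr pd)

-- the values in a bisect-delimited segment of a sorted list are exactly those in [a, b]
lemma seg_mem (sw : List Int) (hs : List.Pairwise (· ≤ ·) sw) (a b w : Int) :
    (∃ i, PySem.List.bisectLeft sw a ≤ i ∧ i < PySem.List.bisectRight sw b ∧ sw.getD i 0 = w)
      ↔ w ∈ sw ∧ a ≤ w ∧ w ≤ b := by
  obtain ⟨hLlen, hL1, hL2⟩ := PySem.List.bisectLeft_spec sw a hs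
  obtain ⟨hRlen, hR1, hR2⟩ := PySem.List.bisectRight_spec sw b hs
  constructor
  · rintro ⟨i, h1, h2, h3⟩
    have hi : i < sw.length := lt_of_lt_of_le h2 hRlen
    rw [List.getD_eq_getElem sw 0 hi] at h3
    refine ⟨h3 ▸ List.getElem_mem hi, ?_, ?_⟩
    · have := hL2 i hi h1; omega
    · have := hR1 i hi h2; omega
  · rintro ⟨hw, ha, hb⟩
    obtain ⟨i, hi, hieq⟩ := List.mem_iff_getElem.mp hw
    refine ⟨i, ?_, ?_, by rw [List.getD_eq_getElem sw 0 hi]; exact hieq⟩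
    · by_contra h
      have := hL1 i hi (by omega)
      omega
    · by_contra h
      have := hR2 i hi (by omega)
      omega

lemma addRangeA_eq_update (sw : List Int) (d : PySem.Set Int) (l r : Nat) :
    addRangeA sw d l r = PySem.Set.update d ((List.range' l (r - l)).map (fun i => sw.getD i 0)) := by
  simp [addRangeA, PySem.Set.update, List.foldl_map]

lemma mem_addRangeA (sw : List Int) (hs : List.Pairwise (· ≤ ·) sw) (d : PySem.Set Int) (a b w : Int) :
    w ∈ addRangeA sw d (PySem.List.bisectLeft sw a) (PySem.List.bisectRight sw b)
      ↔ w ∈ d ∨ (w ∈ sw ∧ a ≤ w ∧ w ≤ b) := by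
  rw [addRangeA_eq_update, PySem.Set.mem_update, ← seg_mem sw hs a b w]
  simp only [List.mem_map, List.mem_range'_1]
  constructor
  · rintro (h | ⟨i, ⟨hi1, hi2⟩, hieq⟩)
    · exact Or.inl h
    · exact Or.inr ⟨i, hi1, by omega, hieq⟩
  · rintro (h | ⟨i, hi1, hi2, hieq⟩)
    · exact Or.inl h
    · exact Or.inr ⟨i, ⟨hi1, by omega⟩, hieq⟩

lemma nodup_addRangeA (sw : List Int) (d : PySem.Set Int) (l r : Nat) (hd : d.Nodup) :
    (addRangeA sw d l r).Nodup := by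
  rw [addRangeA_eq_update]
  exact PySem.Set.nodup_update d _ hd

lemma mem_stepA (sr sw : List Int) (hs : List.Pairwise (· ≤ ·) sw) (d : PySem.Set Int) (pd : Int × Int) (w : Int) :
    w ∈ stepA sr sw d pd ↔ w ∈ d ∨ (w ∈ sw ∧ pvCov sr pd w) := by
  show w ∈ addRangeA sw (addRangeA sw d _ _) _ _ ↔ _
  rw [mem_addRangeA sw hs, mem_addRangeA sw hs]
  by_cases hc : PySem.List.bisectLeft sr pd.1 < sr.length - 1 <;>
    simp only [hc, if_true, if_false, pvCov, pvSpanL, pvSpanR] <;> tauto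

lemma nodup_stepA (sr sw : List Int) (d : PySem.Set Int) (pd : Int × Int) (hd : d.Nodup) :
    (stepA sr sw d pd).Nodup := by
  show (addRangeA sw (addRangeA sw d _ _) _ _).Nodup
  exact nodup_addRangeA _ _ _ _ (nodup_addRangeA _ _ _ _ hd)

lemma foldA_mem (sr sw : List Int) (hs : List.Pairwise (· ≤ ·) sw) (rds : List (Int × Int))
    (d : PySem.Set Int) (w : Int) :
    w ∈ rds.foldl (stepA sr sw) d ↔ w ∈ d ∨ ∃ pd ∈ rds, w ∈ sw ∧ pvCov sr pd w := by
  induction rds generalizing d with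
  | nil => simp
  | cons pd rds ih =>
    rw [List.foldl_cons, ih, mem_stepA sr sw hs]
    simp only [List.mem_cons]
    constructor
    · rintro ((h | h) | ⟨q, hq, hc⟩)
      · exact Or.inl h
      · exact Or.inr ⟨pd, Or.inl rfl, h⟩
      · exact Or.inr ⟨q, Or.inr hq, hc⟩
    · rintro (h | ⟨q, (rfl | hq), hc⟩)
      · exact Or.inl (Or.inl h)
      · exact Or.inl (Or.inr hc)
      · exact Or.inr ⟨q, hq, hc⟩

lemma foldA_nodup (sr sw : List Int) (rds : List (Int × Int)) (d : PySem.Set Int) (hd : d.Nodup) :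
    (rds.foldl (stepA sr sw) d).Nodup := by
  induction rds generalizing d with
  | nil => exact hd
  | cons pd rds ih => exact ih _ (nodup_stepA sr sw d pd hd)

lemma stepB_eq (sr : List Int) :
    stepB sr = fun spans pd => spans ++ [(pvSpanL sr pd, pd.1), (pd.1, pvSpanR sr pd)] := by
  funext spans pd
  simp [stepB, pvSpanL, pvSpanR]

lemma spans_cover (sr : List Int) (rds : List (Int × Int)) (w : Int) :
    (∃ s ∈ rds.foldl (stepB sr) [], s.1 ≤ w ∧ w ≤ s.2) ↔ ∃ pd ∈ rds, pvCov sr pd w := by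
  rw [stepB_eq, PySem.List.foldl_append_eq_flatMap (fun pd => [(pvSpanL sr pd, pd.1), (pd.1, pvSpanR sr pd)])]
  simp only [List.nil_append, List.mem_flatMap, List.mem_cons, List.not_mem_nil, or_false]
  constructor
  · rintro ⟨s, ⟨pd, hpd, (rfl | rfl)⟩, h1, h2⟩
    · exact ⟨pd, hpd, Or.inl ⟨h1, h2⟩⟩
    · exact ⟨pd, hpd, Or.inr ⟨h1, h2⟩⟩
  · rintro ⟨pd, hpd, (⟨h1, h2⟩ | ⟨h1, h2⟩)⟩
    · exact ⟨_, ⟨pd, hpd, Or.inl rfl⟩, h1, h2⟩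
    · exact ⟨_, ⟨pd, hpd, Or.inr rfl⟩, h1, h2⟩

-- 'best ≥ v' for the sweep's optional running maximum
def pvBestGe (best : Option Int) (v : Int) : Prop :=
  match best with
  | some b => v ≤ b
  | none => False

lemma consume_inv (w : Int) (rest : List (Int × Int)) (best : Option Int) (done : List (Int × Int))
    (hrest : rest.Pairwise (fun a b => a.1 ≤ b.1))
    (hbest : ∀ v, pvBestGe best v ↔ ∃ s ∈ done, v ≤ s.2) :
    ∃ taken,
      rest = taken ++ (sweepConsume w rest best).1 ∧
      (∀ s ∈ taken, s.1 ≤ w) ∧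
      (∀ s ∈ (sweepConsume w rest best).1, w < s.1) ∧
      (∀ v, pvBestGe (sweepConsume w rest best).2 v ↔ ∃ s ∈ done ++ taken, v ≤ s.2) := by
  induction rest generalizing best done with
  | nil => exact ⟨[], by simp [sweepConsume], by simp, by simp [sweepConsume], by simpa [sweepConsume] using hbest⟩
  | cons sp rest ih =>
    rw [List.pairwise_cons] at hrest
    by_cases hle : sp.1 ≤ w
    · have hbest' : ∀ v, pvBestGe
          (match best with
            | none => some sp.2
            | some b => if sp.2 > b then some sp.2 else some b) v ↔ ∃ s ∈ done ++ [sp], v ≤ s.2 := by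
        intro v
        have hthis := hbest v
        rcases best with _ | b
        · show pvBestGe (some sp.2) v ↔ _
          simp only [pvBestGe] at hthis ⊢
          constructor
          · intro h
            exact ⟨sp, List.mem_append_right _ (List.mem_singleton.mpr rfl), h⟩
          · rintro ⟨s, hs, hv⟩
            rcases List.mem_append.mp hs with hs | hs
            · exact (hthis.mpr ⟨s, hs, hv⟩).elim
            · rw [List.mem_singleton] at hs
              subst hs
              exact hv
        · show pvBestGe (if sp.2 > b then some sp.2 else some b) v ↔ _
          simp only [pvBestGe] at hthis
          by_cases hgt : sp.2 > b
          · rw [if_pos hgt]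
            simp only [pvBestGe]
            constructor
            · intro h
              exact ⟨sp, List.mem_append_right _ (List.mem_singleton.mpr rfl), h⟩
            · rintro ⟨s, hs, hv⟩
              rcases List.mem_append.mp hs with hs | hs
              · have := hthis.mpr ⟨s, hs, hv⟩
                omega
              · rw [List.mem_singleton] at hs
                subst hs
                exact hv
          · rw [if_neg hgt]
            simp only [pvBestGe]
            constructor
            · intro h
              obtain ⟨s, hs, hv⟩ := hthis.mp h
              exact ⟨s, List.mem_append_left _ hs, hv⟩
            · rintro ⟨s, hs, hv⟩
              rcases List.mem_append.mp hs with hs | hs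
              · exact hthis.mpr ⟨s, hs, hv⟩
              · rw [List.mem_singleton] at hs
                subst hs
                omega
      obtain ⟨taken, heq, htk, hrem, hb⟩ := ih _ (done ++ [sp]) hrest.2 hbest'
      refine ⟨sp :: taken, ?_, ?_, ?_, ?_⟩
      · simp only [sweepConsume, hle, if_true]
        exact congrArg (sp :: ·) heq
      · intro s hs
        rcases List.mem_cons.mp hs with rfl | hs
        · exact hle
        · exact htk s hs
      · simpa only [sweepConsume, hle, if_true] using hrem
      · simpa only [sweepConsume, hle, if_true, List.append_assoc, List.singleton_append] using hb
    · refine ⟨[], by simp [sweepConsume, hle], by simp, ?_, by simpa [sweepConsume, hle] using hbest⟩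
      intro s hs
      simp only [sweepConsume, hle, if_false] at hs
      rcases List.mem_cons.mp hs with rfl | hs
      · omega
      · have := hrest.1 s hs
        omega

lemma count_aux (C : Prop) [Decidable C] (count : Int) (m : Nat) (cb : Bool)
    (hcb : cb = true ↔ C) :
    (if cb then count + 1 else count) + (m : Int)
      = count + (((m + if decide C = true then 1 else 0 : Nat)) : Int) := by
  by_cases h : C
  · rw [if_pos (hcb.mpr h), if_pos (decide_eq_true_iff.mpr h)]
    push_cast
    ring
  · rw [if_neg (fun hh => h (hcb.mp hh)), if_neg (fun hh => h (decide_eq_true_iff.mp hh))]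
    push_cast
    ring

lemma sweepB_count (dw : List Int) (rest : List (Int × Int)) (best : Option Int) (count : Int)
    (done : List (Int × Int))
    (hdw : dw.Pairwise (· ≤ ·))
    (hrest : rest.Pairwise (fun a b => a.1 ≤ b.1))
    (hbest : ∀ v, pvBestGe best v ↔ ∃ s ∈ done, v ≤ s.2)
    (hdone : ∀ s ∈ done, ∀ w ∈ dw, s.1 ≤ w) :
    sweepB dw rest best count
      = count + ((dw.countP (fun w => decide (∃ s ∈ done ++ rest, s.1 ≤ w ∧ w ≤ s.2))) : Int) := by
  induction dw generalizing rest best count done with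
  | nil => simp [sweepB]
  | cons w dws ih =>
    rw [List.pairwise_cons] at hdw
    obtain ⟨taken, heq, htk, hrem, hb⟩ := consume_inv w rest best done hrest hbest
    have hkey : pvBestGe (sweepConsume w rest best).2 w ↔ ∃ s ∈ done ++ rest, s.1 ≤ w ∧ w ≤ s.2 := by
      rw [hb w, heq]
      constructor
      · rintro ⟨s, hs, h2⟩
        rcases List.mem_append.mp hs with hs | hs
        · exact ⟨s, List.mem_append_left _ hs, hdone s hs w (List.mem_cons_self), h2⟩
        · exact ⟨s, List.mem_append_right _ (List.mem_append_left _ hs), htk s hs, h2⟩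
      · rintro ⟨s, hs, h1, h2⟩
        rcases List.mem_append.mp hs with hs | hs
        · exact ⟨s, List.mem_append_left _ hs, h2⟩
        · rcases List.mem_append.mp hs with hs | hs
          · exact ⟨s, List.mem_append_right _ hs, h2⟩
          · exact absurd h1 (by have := hrem s hs; omega)
    have hrest' : (sweepConsume w rest best).1.Pairwise (fun a b => a.1 ≤ b.1) :=
      (heq ▸ hrest).sublist (List.sublist_append_right taken _)
    have hdone' : ∀ s ∈ done ++ taken, ∀ w' ∈ dws, s.1 ≤ w' := by
      intro s hs w' hw'
      have hww' := hdw.1 w' hw'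
      rcases List.mem_append.mp hs with hs | hs
      · have := hdone s hs w (List.mem_cons_self); omega
      · have := htk s hs; omega
    have hfull : (done ++ taken) ++ (sweepConsume w rest best).1 = done ++ rest := by
      rw [List.append_assoc, ← heq]
    have := ih (sweepConsume w rest best).1 (sweepConsume w rest best).2
      (if (match (sweepConsume w rest best).2 with | some b => decide (b ≥ w) | none => false)
        then count + 1 else count) (done ++ taken) hdw.2 hrest' hb hdone'
    rw [hfull] at this
    have hcond : (match (sweepConsume w rest best).2 with | some b => decide (b ≥ w) | none => false)
        = decide (∃ s ∈ done ++ rest, s.1 ≤ w ∧ w ≤ s.2) := by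
      rcases hM : (sweepConsume w rest best).2 with _ | b
      · rw [hM] at hkey
        simp only [pvBestGe] at hkey
        exact (decide_eq_false_iff_not.mpr (fun h => hkey.mpr h)).symm
      · rw [hM] at hkey
        simp only [pvBestGe] at hkey
        exact decide_eq_decide.mpr (ge_iff_le.trans hkey)
    show sweepB (w :: dws) rest best count = _
    rw [show sweepB (w :: dws) rest best count
        = sweepB dws (sweepConsume w rest best).1 (sweepConsume w rest best).2
            (if (match (sweepConsume w rest best).2 with | some b => decide (b ≥ w) | none => false)
              then count + 1 else count) from rfl, this, List.countP_cons]
    exact count_aux _ count _ _ (by rw [hcond]; exact decide_eq_true_iff)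

-- ===== VERDICT (by name: the statement is the Claim_ definition above) =====
theorem maxWallsDestroyed_spec : Claim_equal_maxWallsDestroyed := by
  intro robots distance walls _
  show maxWallsDestroyed robots distance walls = maxWallsDestroyed_alt robots distance walls
  have hs : List.Pairwise (· ≤ ·) (PySem.List.sorted walls (fun x => x) false) := by
    simpa using PySem.List.sorted_pairwise walls (fun x => x)
  have hdw : (PySem.List.sorted (PySem.Set.ofList walls) (fun x => x) false).Pairwise (· ≤ ·) := by
    simpa using PySem.List.sorted_pairwise (PySem.Set.ofList walls) (fun x => x)
  show ((((robots.zip distance).foldl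
        (stepA (PySem.List.sorted robots (fun x => x) false) (PySem.List.sorted walls (fun x => x) false))
        PySem.Set.empty).length : Nat) : Int)
    = sweepB (PySem.List.sorted (PySem.Set.ofList walls) (fun x => x) false)
        (PySem.List.sorted ((robots.zip distance).foldl (stepB (PySem.List.sorted robots (fun x => x) false)) [])
          (fun s => s.1) false) none 0
  rw [sweepB_count _ _ _ _ []
    hdw (PySem.List.sorted_pairwise _ _) (by simp [pvBestGe]) (by simp), zero_add]
  simp only [List.nil_append]
  rw [List.countP_eq_length_filter]
  have hnA : ((robots.zip distance).foldl
      (stepA (PySem.List.sorted robots (fun x => x) false) (PySem.List.sorted walls (fun x => x) false))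
      PySem.Set.empty).Nodup := foldA_nodup _ _ _ _ List.nodup_nil
  have hnB : ((PySem.List.sorted (PySem.Set.ofList walls) (fun x => x) false).filter
      (fun w => decide (∃ s ∈ PySem.List.sorted
          ((robots.zip distance).foldl (stepB (PySem.List.sorted robots (fun x => x) false)) [])
          (fun s => s.1) false, s.1 ≤ w ∧ w ≤ s.2))).Nodup := by
    apply List.Nodup.filter
    exact ((PySem.List.sorted_perm (PySem.Set.ofList walls) (fun x => x) false).nodup_iff).mpr
      (PySem.Set.nodup_ofList walls)
  have hperm := (List.perm_ext_iff_of_nodup hnA hnB).mpr ?_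
  · exact_mod_cast hperm.length_eq
  · intro w
    rw [foldA_mem _ _ hs]
    simp only [PySem.Set.empty, List.not_mem_nil, false_or, List.mem_filter,
      PySem.List.mem_sorted, PySem.Set.mem_ofList, decide_eq_true_eq, spans_cover]
    constructor
    · rintro ⟨pd, hpd, hw, hc⟩
      exact ⟨hw, pd, hpd, hc⟩
    · rintro ⟨hw, pd, hpd, hc⟩
      exact ⟨pd, hpd, hw, hc⟩
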